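-- pv_equiv track=rewrite | github.com/alexandraback/datacollection | solutions_5686313294495744_0/Python/CMM/C.py | solve
-- ===== SOURCE A (Python) =====
-- def test(d, f):
-- 	for i in range(len(d)):
-- 		if f[i] == "0":
-- 			a = False
-- 			b = False
-- 			for j in range(len(d)):
-- 				if d[i][0] == d[j][0] and f[j] == "1":
-- 					a = True
-- 				if d[i][1] == d[j][1] and f[j] == "1":
-- 					b = True
-- 			if a == False or b == False:
-- 				return False
-- 	return True
--
-- def solve(d):
-- 	big = 0
-- 	n = len(d)
-- 	for i in range(0, 2**n):
-- 		f= (("0"*16) + bin(i)[2:])[-n:]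
-- 		if f.count("0") <= big:
-- 			continue
-- 		if test(d, f):
-- 			if f.count("0") > big:
-- 				big = f.count("0")
-- 	return big
-- ===== SOURCE B (Python) =====
-- def solve(d):
-- 	# A kept subset is valid iff every row and every column occurring in d
-- 	# also occurs among the kept pairs (a removed pair then has a kept
-- 	# row-witness and a kept column-witness; a kept pair witnesses itself).
-- 	# So the answer is len(d) minus the size of a minimum subset whose rows
-- 	# and columns cover all rows and columns of d; compute that minimum by
-- 	# a skip/take recursion over the list.
-- 	rows = {r for r, _ in d}
-- 	cols = {c for _, c in d}
--
-- 	def best(items, kr, kc):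
-- 		# minimum number of pairs to take from items so that, together with
-- 		# kr/kc, all of rows/cols are covered; None if impossible
-- 		if not items:
-- 			return 0 if rows <= kr and cols <= kc else None
-- 		(r, c) = items[0]
-- 		rest = items[1:]
-- 		skip = best(rest, kr, kc)
-- 		take = best(rest, kr | {r}, kc | {c})
-- 		if take is not None:
-- 			take += 1
-- 		if skip is None:
-- 			return take
-- 		if take is None:
-- 			return skip
-- 		return min(skip, take)
--
-- 	return len(d) - best(d, set(), set())
-- ===== Notes on version B (the rewrite author's own statement) =====
-- stated objective: alternative
-- what changed: B reformulates validity as 'the kept pairs cover every row and every column of d' and computes the minimum kept count by a skip/take recursion over the list, returning n minus that minimum, instead of A's loop over 2^n binary strings that rescans all elements for each removed one and maximises the removed count.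
-- intended difference: On the empty list A returns 17 (the 16-zero padding leaks through the slice [-0:], so f is '0'*17 and its zeros are counted), while B returns the intended 0: no pair can be removed from an empty input. — e.g. on solve([]): A returns 17, B returns 0
import Mathlib
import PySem

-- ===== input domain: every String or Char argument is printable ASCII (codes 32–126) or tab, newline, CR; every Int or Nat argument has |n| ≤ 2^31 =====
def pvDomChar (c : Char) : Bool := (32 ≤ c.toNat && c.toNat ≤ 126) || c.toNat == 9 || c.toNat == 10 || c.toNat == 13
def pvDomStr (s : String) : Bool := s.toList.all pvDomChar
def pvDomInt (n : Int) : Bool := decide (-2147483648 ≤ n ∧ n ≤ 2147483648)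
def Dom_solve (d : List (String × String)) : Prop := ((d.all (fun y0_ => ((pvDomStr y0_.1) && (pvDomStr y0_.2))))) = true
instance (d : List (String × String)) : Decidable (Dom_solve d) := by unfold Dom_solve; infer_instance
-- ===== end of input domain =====

-- B reformulates validity as "the kept pairs cover every row and every column of d" and
-- computes the minimum kept count by a skip/take recursion over the list, returning
-- len(d) minus that minimum, instead of A's loop over 2^n binary strings.

-- ===== PORT A =====

-- d[i] for an index produced by range(len(d)); always in range where used
def pyAt (xs : List (String × String)) (i : Nat) : String × String :=
  (PySem.List.pyGet? xs (i : Int)).getD ("", "")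

-- f[i] for an index produced by range(len(d)); in range on every input Pre_solve admits
def pyCh (f : List Char) (i : Nat) : Char :=
  (PySem.List.pyGet? f (i : Int)).getD ' '

def testA (d : List (String × String)) (f : List Char) : Bool :=
  (List.range d.length).all fun i =>
    if pyCh f i = '0' then
      let ab := (List.range d.length).foldl (fun (ab : Bool × Bool) j =>
        (if (pyAt d i).1 == (pyAt d j).1 && pyCh f j == '1' then true else ab.1,
         if (pyAt d i).2 == (pyAt d j).2 && pyCh f j == '1' then true else ab.2))
        (false, false)
      ab.1 && ab.2
    else true

def solve (d : List (String × String)) : Int :=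
  let n := d.length
  (List.range (2 ^ n)).foldl (fun (big : Int) (i : Nat) =>
    -- f = (("0"*16) + bin(i)[2:])[-n:] ; bin(i)[2:] for i ≥ 0 is exactly PySem.Int.toBinChars
    let f := PySem.List.slice (List.replicate 16 '0' ++ PySem.Int.toBinChars (i : Int))
      (some (-(n : Int))) none
    if (f.count '0' : Int) ≤ big then big
    else if testA d f then
      (if (f.count '0' : Int) > big then (f.count '0' : Int) else big)
    else big) 0

-- ===== PORT B =====

-- best(items, kr, kc): minimum number of pairs to take from items so that, together with
-- kr/kc, all of rows/cols are covered; none = Python's None (impossible).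
-- kr | {r} adds the single element r, likewise kc | {c}.
def bestB (rows cols : PySem.Set String) :
    List (String × String) → PySem.Set String → PySem.Set String → Option Int
  | [], kr, kc =>
      if PySem.Set.issubset rows kr && PySem.Set.issubset cols kc then some 0 else none
  | rc :: rest, kr, kc =>
      let skip := bestB rows cols rest kr kc
      let take := (bestB rows cols rest (PySem.Set.add kr rc.1) (PySem.Set.add kc rc.2)).map (· + 1)
      match skip, take with
      | none, t => t
      | some s, none => some s
      | some s, some t => some (min s t)

def solve_alt (d : List (String × String)) : Int :=
  let rows := PySem.Set.ofList (d.map Prod.fst)   -- {r for r, _ in d}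
  let cols := PySem.Set.ofList (d.map Prod.snd)   -- {c for _, c in d}
  match bestB rows cols d PySem.Set.empty PySem.Set.empty with
  | some m => (d.length : Int) - m
  | none => 0   -- unreachable: taking every pair always covers all rows and columns

-- ===== PRECONDITION & SPEC =====

-- A raises IndexError as soon as len(d) ≥ 18: the padded binary string has only 16 + bits(i)
-- characters, so f is shorter than len(d) and f[i] goes out of range inside test.
def Pre_solve (d : List (String × String)) : Prop := d.length ≤ 17
instance (d : List (String × String)) : Decidable (Pre_solve d) := by unfold Pre_solve; infer_instance
def pvWitness_solve : (List (String × String)) := [("a", "b")]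

-- On the empty list A returns 17 (the 16-zero padding leaks through the slice [-0:], so f is
-- "0"*17 and its zeros are counted), while B returns the intended 0: nothing can be removed
-- from an empty input.
def D_solve (d : List (String × String)) : Prop := d = []
instance (d : List (String × String)) : Decidable (D_solve d) := by unfold D_solve; infer_instance

def Spec_solve (d : List (String × String)) (out : Int) : Prop := ¬ D_solve d → out = solve_alt d
instance (d : List (String × String)) (out : Int) : Decidable (Spec_solve d out) := by unfold Spec_solve; infer_instance

def pvDiffWitness_solve : (List (String × String)) := []
def pvDiffWitnessOut_solve : Int × Int := (17, 0)

-- ===== CLAIM (what is proved, stated in full; the proofs are below) =====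
def Claim_unchanged_solve : Prop := ∀ (d : List (String × String)), Dom_solve d → Pre_solve d → Spec_solve d (solve d)
def Claim_changed_solve : Prop := Dom_solve (pvDiffWitness_solve) ∧ Pre_solve (pvDiffWitness_solve) ∧ D_solve (pvDiffWitness_solve) ∧ solve (pvDiffWitness_solve) = pvDiffWitnessOut_solve.1 ∧ solve_alt (pvDiffWitness_solve) = pvDiffWitnessOut_solve.2 ∧ pvDiffWitnessOut_solve.1 ≠ pvDiffWitnessOut_solve.2
def Claim_exact_solve : Prop := ∀ (d : List (String × String)), Dom_solve d → Pre_solve d → D_solve d → solve d ≠ solve_alt d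

-- ===== LEMMAS AND PROOFS =====

-- the binary digits of n (most significant first), bin(n)[2:]
def myBin (n : Nat) : List Char :=
  if _ : n < 2 then [Nat.digitChar n]
  else myBin (n / 2) ++ [Nat.digitChar (n % 2)]
decreasing_by exact Nat.div_lt_self (by omega) (by omega)

def bitChar (i k : Nat) : Char := if i.testBit k then '1' else '0'

-- lsb-first bit characters of i, width n; f in A is (bits n i).reverse
def bits (n i : Nat) : List Char := (List.range n).map (bitChar i)

lemma toDigitsCore_acc (fuel : Nat) : ∀ (n : Nat) (ds : List Char),
    Nat.toDigitsCore 2 fuel n ds = Nat.toDigitsCore 2 fuel n [] ++ ds := by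
  induction fuel with
  | zero => intro n ds; simp [Nat.toDigitsCore]
  | succ f ih =>
    intro n ds
    simp only [Nat.toDigitsCore]
    by_cases h : n / 2 = 0
    · simp [h]
    · simp only [h, if_false]
      rw [ih (n/2) [Nat.digitChar (n % 2)], ih (n/2) (Nat.digitChar (n % 2) :: ds)]
      simp

lemma toDigitsCore_eq_myBin (n : Nat) : ∀ fuel, n < fuel → Nat.toDigitsCore 2 fuel n [] = myBin n := by
  induction n using Nat.strong_induction_on with
  | _ n ih =>
    intro fuel hf
    obtain ⟨f, rfl⟩ : ∃ f, fuel = f + 1 := ⟨fuel - 1, by omega⟩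
    · simp only [Nat.toDigitsCore]
      by_cases h : n / 2 = 0
      · have hn : n < 2 := by omega
        have : n % 2 = n := by omega
        rw [h, if_pos rfl, myBin, dif_pos hn, this]
      · rw [if_neg h, toDigitsCore_acc]
        have h2 : 2 ≤ n := by omega
        rw [ih (n/2) (by omega) f (by omega)]
        conv_rhs => rw [myBin]
        rw [dif_neg (by omega)]

lemma toBinChars_eq_myBin (i : Nat) : PySem.Int.toBinChars (i : Int) = myBin i := by
  simp only [PySem.Int.toBinChars]
  rw [if_neg (by omega)]
  simp only [Int.toNat_natCast]
  exact toDigitsCore_eq_myBin i (i+1) (by omega)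

lemma myBin_length_pos (n : Nat) : 1 ≤ (myBin n).length := by
  rw [myBin]
  split <;> simp

lemma myBin_rev_getD (n : Nat) : ∀ k, k < (myBin n).length + 16 →
    ((myBin n).reverse ++ List.replicate 16 '0').getD k 'x' = bitChar n k := by
  induction n using Nat.strong_induction_on with
  | _ n ih =>
    intro k hk
    by_cases h : n < 2
    · rw [myBin, dif_pos h] at hk ⊢
      simp only [List.length_cons, List.length_nil] at hk
      match k, hk with
      | 0, _ =>
        interval_cases n <;> simp [bitChar] <;> decide
      | (k' + 1), _ =>
        have hk' : k' < 16 := by omega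
        simp only [List.reverse_cons, List.reverse_nil, List.nil_append, List.cons_append,
          List.getD_cons_succ]
        rw [List.getD_eq_getElem _ _ (by simpa using hk'), List.getElem_replicate]
        have : n.testBit (k' + 1) = false := by
          interval_cases n <;> simp [Nat.testBit_add_one]
        simp [bitChar, this]
    · rw [myBin, dif_neg h] at hk ⊢
      simp only [List.length_append, List.length_cons, List.length_nil] at hk
      rw [List.reverse_append]
      simp only [List.reverse_cons, List.reverse_nil, List.nil_append, List.cons_append]
      match k, hk with
      | 0, _ =>
        simp only [List.getD_cons_zero]
        rcases Nat.mod_two_eq_zero_or_one n with h2 | h2 <;>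
          simp [bitChar, Nat.testBit_zero, h2, Nat.digitChar]
      | (k' + 1), _ =>
        simp only [List.getD_cons_succ]
        rw [ih (n/2) (Nat.div_lt_self (by omega) (by omega)) k' (by omega)]
        simp [bitChar, Nat.testBit_add_one]

lemma f_eq (i n : Nat) (h1 : 1 ≤ n) (h2 : n ≤ 17) :
    PySem.List.slice (List.replicate 16 '0' ++ PySem.Int.toBinChars (i : Int))
      (some (-(n : Int))) none = (bits n i).reverse := by
  rw [toBinChars_eq_myBin]
  have hlen := myBin_length_pos i
  rw [PySem.List.slice_from_neg_natCast _ n (by omega)]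
  have hL : (List.replicate 16 '0' ++ myBin i).length = 16 + (myBin i).length := by simp; omega
  rw [← List.reverse_reverse (((List.replicate 16 '0' ++ myBin i)).drop _)]
  congr 1
  rw [List.reverse_drop]
  have hn : (List.replicate 16 '0' ++ myBin i).length -
      ((List.replicate 16 '0' ++ myBin i).length - n) = n := by omega
  rw [hn]
  have hrev : (List.replicate 16 '0' ++ myBin i).reverse
      = (myBin i).reverse ++ List.replicate 16 '0' := by
    rw [List.reverse_append, List.reverse_replicate]
  rw [hrev]
  apply List.ext_getElem
  · simp [bits]; omega
  · intro k hk1 hk2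
    have hk : k < n := by simpa [bits] using hk2
    rw [List.getElem_take]
    have hkl : k < ((myBin i).reverse ++ List.replicate 16 '0').length := by simp; omega
    rw [← List.getD_eq_getElem _ 'x' hkl, myBin_rev_getD i k (by omega)]
    simp [bits, bitChar]

lemma foldl_pair_flags (l : List Nat) (p q : Nat → Bool) : ∀ (a b : Bool),
    l.foldl (fun (ab : Bool × Bool) j =>
      (if p j then true else ab.1, if q j then true else ab.2)) (a, b)
    = (a || l.any p, b || l.any q) := by
  induction l with
  | nil => intro a b; simp
  | cons x xs ih =>
    intro a b
    rw [List.foldl_cons, ih]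
    cases hp : p x <;> cases hq : q x <;> simp [List.any_cons, hp, hq]

-- ---- decision lists: all 0/1 character lists of a given length, in the order generated
-- ---- by A's enumeration of masks 0 .. 2^n - 1 (most significant bit first)

def decs : Nat → List (List Char)
  | 0 => [[]]
  | n + 1 => (decs n).map ('0' :: ·) ++ (decs n).map ('1' :: ·)

lemma mem_decs_length {n : Nat} : ∀ {cs : List Char}, cs ∈ decs n → cs.length = n := by
  induction n with
  | zero => intro cs h; simp [decs] at h; simp [h]
  | succ n ih =>
    intro cs h
    simp only [decs, List.mem_append, List.mem_map] at h
    rcases h with ⟨a, ha, rfl⟩ | ⟨a, ha, rfl⟩ <;> simp [ih ha]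

lemma mem_decs_chars {n : Nat} : ∀ {cs : List Char}, cs ∈ decs n → ∀ c ∈ cs, c = '0' ∨ c = '1' := by
  induction n with
  | zero => intro cs h; simp [decs] at h; simp [h]
  | succ n ih =>
    intro cs h c hc
    simp only [decs, List.mem_append, List.mem_map] at h
    rcases h with ⟨a, ha, rfl⟩ | ⟨a, ha, rfl⟩ <;> rcases List.mem_cons.mp hc with rfl | hc2 <;>
      first | (left; rfl) | (right; rfl) | exact ih ha c hc2

lemma replicate_mem_decs (n : Nat) : List.replicate n '1' ∈ decs n := by
  induction n with
  | zero => simp [decs]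
  | succ n ih =>
    simp only [decs, List.mem_append, List.mem_map, List.replicate_succ]
    exact Or.inr ⟨_, ih, rfl⟩

lemma count_decs {n : Nat} : ∀ {cs : List Char}, cs ∈ decs n →
    cs.count '0' + cs.count '1' = n := by
  induction n with
  | zero => intro cs h; simp [decs] at h; simp [h]
  | succ n ih =>
    intro cs h
    simp only [decs, List.mem_append, List.mem_map] at h
    rcases h with ⟨a, ha, rfl⟩ | ⟨a, ha, rfl⟩ <;>
      · have := ih ha
        simp
        omega

lemma bits_snoc (n i : Nat) : bits (n + 1) i = bits n i ++ [bitChar i n] := by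
  simp [bits, List.range_succ]

lemma map_wbits_range : ∀ n, (List.range (2 ^ n)).map (fun i => (bits n i).reverse) = decs n := by
  intro n
  induction n with
  | zero => simp [decs, bits]
  | succ n ih =>
    have hsplit : (2 : Nat) ^ (n + 1) = 2 ^ n + 2 ^ n := by ring
    rw [hsplit, List.range_add, List.map_append, List.map_map]
    have h1 : (List.range (2 ^ n)).map (fun i => (bits (n + 1) i).reverse)
        = (List.range (2 ^ n)).map (fun i => '0' :: (bits n i).reverse) := by
      apply List.map_congr_left
      intro i hi
      have hlt : i < 2 ^ n := List.mem_range.mp hi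
      rw [bits_snoc, List.reverse_append]
      have : bitChar i n = '0' := by
        simp [bitChar, Nat.testBit_lt_two_pow hlt]
      simp [this]
    have h2 : (List.range (2 ^ n)).map ((fun i => (bits (n + 1) i).reverse) ∘ fun x => 2 ^ n + x)
        = (List.range (2 ^ n)).map (fun i => '1' :: (bits n i).reverse) := by
      apply List.map_congr_left
      intro i hi
      have hlt : i < 2 ^ n := List.mem_range.mp hi
      simp only [Function.comp]
      rw [bits_snoc, List.reverse_append]
      have hb : bitChar (2 ^ n + i) n = '1' := by
        simp [bitChar, Nat.testBit_two_pow_add_eq, Nat.testBit_lt_two_pow hlt]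
      have hrest : bits n (2 ^ n + i) = bits n i := by
        apply List.map_congr_left
        intro k hk
        have hkn : k < n := List.mem_range.mp hk
        simp [bitChar, Nat.testBit_two_pow_add_gt hkn]
      simp [hb, hrest]
    rw [h1, h2, decs, ← ih, List.map_map, List.map_map]
    rfl

-- the kept rows/columns accumulated along the decisions cs over items, matching B's recursion
def addKept : List (String × String) → List Char →
    PySem.Set String × PySem.Set String → PySem.Set String × PySem.Set String
  | [], _, s => s
  | _ :: _, [], s => s
  | rc :: rest, ch :: cs, s =>
      addKept rest cs (if ch = '1' then (PySem.Set.add s.1 rc.1, PySem.Set.add s.2 rc.2) else s)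

lemma mem_addKept_fst : ∀ (items : List (String × String)) (cs : List Char)
    (s : PySem.Set String × PySem.Set String) (x : String),
    (x ∈ (addKept items cs s).1 ↔ x ∈ s.1 ∨ ∃ p ∈ items.zip cs, p.2 = '1' ∧ p.1.1 = x) := by
  intro items
  induction items with
  | nil => intro cs s x; simp [addKept]
  | cons rc rest ih =>
    intro cs s x
    cases cs with
    | nil => simp [addKept]
    | cons ch cs' =>
      rw [show addKept (rc :: rest) (ch :: cs') s
            = addKept rest cs' (if ch = '1'
                then (PySem.Set.add s.1 rc.1, PySem.Set.add s.2 rc.2) else s) from rfl]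
      by_cases hch : ch = '1'
      · subst hch
        rw [if_pos rfl, ih]
        simp only [PySem.Set.mem_add, List.zip_cons_cons, List.mem_cons]
        constructor
        · rintro (⟨h | rfl⟩ | ⟨p, hp, h1, h2⟩)
          · exact Or.inl h
          · exact Or.inr ⟨(rc, '1'), Or.inl rfl, rfl, rfl⟩
          · exact Or.inr ⟨p, Or.inr hp, h1, h2⟩
        · rintro (h | ⟨p, rfl | hp, h1, h2⟩)
          · exact Or.inl (Or.inl h)
          · exact Or.inl (Or.inr h2.symm)
          · exact Or.inr ⟨p, hp, h1, h2⟩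
      · rw [if_neg hch, ih]
        simp only [List.zip_cons_cons, List.mem_cons]
        constructor
        · rintro (h | ⟨p, hp, h1, h2⟩)
          · exact Or.inl h
          · exact Or.inr ⟨p, Or.inr hp, h1, h2⟩
        · rintro (h | ⟨p, rfl | hp, h1, h2⟩)
          · exact Or.inl h
          · exact absurd h1 hch
          · exact Or.inr ⟨p, hp, h1, h2⟩

lemma mem_addKept_snd : ∀ (items : List (String × String)) (cs : List Char)
    (s : PySem.Set String × PySem.Set String) (x : String),
    (x ∈ (addKept items cs s).2 ↔ x ∈ s.2 ∨ ∃ p ∈ items.zip cs, p.2 = '1' ∧ p.1.2 = x) := by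
  intro items
  induction items with
  | nil => intro cs s x; simp [addKept]
  | cons rc rest ih =>
    intro cs s x
    cases cs with
    | nil => simp [addKept]
    | cons ch cs' =>
      rw [show addKept (rc :: rest) (ch :: cs') s
            = addKept rest cs' (if ch = '1'
                then (PySem.Set.add s.1 rc.1, PySem.Set.add s.2 rc.2) else s) from rfl]
      by_cases hch : ch = '1'
      · subst hch
        rw [if_pos rfl, ih]
        simp only [PySem.Set.mem_add, List.zip_cons_cons, List.mem_cons]
        constructor
        · rintro (⟨h | rfl⟩ | ⟨p, hp, h1, h2⟩)
          · exact Or.inl h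
          · exact Or.inr ⟨(rc, '1'), Or.inl rfl, rfl, rfl⟩
          · exact Or.inr ⟨p, Or.inr hp, h1, h2⟩
        · rintro (h | ⟨p, rfl | hp, h1, h2⟩)
          · exact Or.inl (Or.inl h)
          · exact Or.inl (Or.inr h2.symm)
          · exact Or.inr ⟨p, hp, h1, h2⟩
      · rw [if_neg hch, ih]
        simp only [List.zip_cons_cons, List.mem_cons]
        constructor
        · rintro (h | ⟨p, hp, h1, h2⟩)
          · exact Or.inl h
          · exact Or.inr ⟨p, Or.inr hp, h1, h2⟩
        · rintro (h | ⟨p, rfl | hp, h1, h2⟩)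
          · exact Or.inl h
          · exact absurd h1 hch
          · exact Or.inr ⟨p, hp, h1, h2⟩

lemma zip_mem_iff {α β : Type} (as : List α) (bs : List β) (h : bs.length = as.length)
    (P : α × β → Prop) :
    (∃ p ∈ as.zip bs, P p) ↔ ∃ j, ∃ hj : j < as.length, P (as[j]'hj, bs[j]'(h ▸ hj)) := by
  constructor
  · rintro ⟨p, hp, hP⟩
    obtain ⟨j, hj, hpj⟩ := List.mem_iff_getElem.mp hp
    have hj' : j < as.length := by simp [List.length_zip, h] at hj; omega
    refine ⟨j, hj', ?_⟩
    rw [← hpj] at hP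
    rwa [List.getElem_zip] at hP
  · rintro ⟨j, hj, hP⟩
    refine ⟨(as[j]'hj, bs[j]'(h ▸ hj)), ?_, hP⟩
    have hjz : j < (as.zip bs).length := by simp [List.length_zip, h]; omega
    have hmm := List.getElem_mem hjz
    rwa [List.getElem_zip] at hmm

lemma testA_eq_cov (d : List (String × String)) (cs : List Char)
    (hlen : cs.length = d.length) (hch : ∀ c ∈ cs, c = '0' ∨ c = '1') :
    testA d cs = (PySem.Set.issubset (PySem.Set.ofList (d.map Prod.fst))
        (addKept d cs (PySem.Set.empty, PySem.Set.empty)).1 &&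
      PySem.Set.issubset (PySem.Set.ofList (d.map Prod.snd))
        (addKept d cs (PySem.Set.empty, PySem.Set.empty)).2) := by
  have hpyCh : ∀ j (hj : j < d.length), pyCh cs j = cs[j]'(by omega) := by
    intro j hj
    unfold pyCh
    rw [PySem.List.pyGet?_natCast, List.getElem?_eq_getElem (by omega), Option.getD_some]
  have hpyAt : ∀ j (hj : j < d.length), pyAt d j = d[j]'hj := by
    intro j hj
    unfold pyAt
    rw [PySem.List.pyGet?_natCast, List.getElem?_eq_getElem hj, Option.getD_some]
  have hmemR : ∀ x, x ∈ (addKept d cs (PySem.Set.empty, PySem.Set.empty)).1 ↔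
      ∃ j, ∃ hj : j < d.length, cs[j]'(hlen ▸ hj) = '1' ∧ (d[j]'hj).1 = x := by
    intro x
    rw [mem_addKept_fst, zip_mem_iff d cs hlen]
    simp only [PySem.Set.empty, List.not_mem_nil, false_or]
  have hmemC : ∀ x, x ∈ (addKept d cs (PySem.Set.empty, PySem.Set.empty)).2 ↔
      ∃ j, ∃ hj : j < d.length, cs[j]'(hlen ▸ hj) = '1' ∧ (d[j]'hj).2 = x := by
    intro x
    rw [mem_addKept_snd, zip_mem_iff d cs hlen]
    simp only [PySem.Set.empty, List.not_mem_nil, false_or]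
  rw [Bool.eq_iff_iff, Bool.and_eq_true, PySem.Set.issubset_iff, PySem.Set.issubset_iff]
  unfold testA
  rw [List.all_eq_true]
  constructor
  · intro hall
    constructor
    · intro x hx
      rw [PySem.Set.mem_ofList, List.mem_map] at hx
      obtain ⟨a, ha, rfl⟩ := hx
      obtain ⟨i, hi, rfl⟩ := List.mem_iff_getElem.mp ha
      rw [hmemR]
      rcases hch (cs[i]'(by omega)) (List.getElem_mem _) with h0 | h1
      · have hthis := hall i (List.mem_range.mpr hi)
        rw [if_pos (by rw [hpyCh i hi]; exact h0)] at hthis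
        simp only at hthis
        rw [foldl_pair_flags] at hthis
        simp only [Bool.false_or, Bool.and_eq_true, List.any_eq_true, List.mem_range] at hthis
        obtain ⟨⟨j, hj, hpj1, hpj2⟩, _⟩ := hthis
        rw [beq_iff_eq, hpyAt i hi, hpyAt j hj] at hpj1
        rw [beq_iff_eq, hpyCh j hj] at hpj2
        exact ⟨j, hj, hpj2, hpj1.symm⟩
      · exact ⟨i, hi, h1, rfl⟩
    · intro x hx
      rw [PySem.Set.mem_ofList, List.mem_map] at hx
      obtain ⟨a, ha, rfl⟩ := hx
      obtain ⟨i, hi, rfl⟩ := List.mem_iff_getElem.mp ha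
      rw [hmemC]
      rcases hch (cs[i]'(by omega)) (List.getElem_mem _) with h0 | h1
      · have hthis := hall i (List.mem_range.mpr hi)
        rw [if_pos (by rw [hpyCh i hi]; exact h0)] at hthis
        simp only at hthis
        rw [foldl_pair_flags] at hthis
        simp only [Bool.false_or, Bool.and_eq_true, List.any_eq_true, List.mem_range] at hthis
        obtain ⟨_, ⟨j, hj, hqj1, hqj2⟩⟩ := hthis
        rw [beq_iff_eq, hpyAt i hi, hpyAt j hj] at hqj1
        rw [beq_iff_eq, hpyCh j hj] at hqj2
        exact ⟨j, hj, hqj2, hqj1.symm⟩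
      · exact ⟨i, hi, h1, rfl⟩
  · rintro ⟨hr, hc⟩ i hi
    have hi' : i < d.length := List.mem_range.mp hi
    by_cases h0 : pyCh cs i = '0'
    · rw [if_pos h0]
      simp only
      rw [foldl_pair_flags]
      simp only [Bool.false_or, Bool.and_eq_true, List.any_eq_true, List.mem_range]
      have hxr : (d[i]'hi').1 ∈ PySem.Set.ofList (d.map Prod.fst) := by
        rw [PySem.Set.mem_ofList, List.mem_map]
        exact ⟨d[i]'hi', List.getElem_mem _, rfl⟩
      have hxc : (d[i]'hi').2 ∈ PySem.Set.ofList (d.map Prod.snd) := by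
        rw [PySem.Set.mem_ofList, List.mem_map]
        exact ⟨d[i]'hi', List.getElem_mem _, rfl⟩
      obtain ⟨j, hj, hj1, hj2⟩ := (hmemR _).mp (hr _ hxr)
      obtain ⟨k, hk, hk1, hk2⟩ := (hmemC _).mp (hc _ hxc)
      constructor
      · refine ⟨j, hj, ?_, ?_⟩
        · rw [beq_iff_eq, hpyAt i hi', hpyAt j hj]; exact hj2.symm
        · rw [beq_iff_eq, hpyCh j hj]; exact hj1
      · refine ⟨k, hk, ?_, ?_⟩
        · rw [beq_iff_eq, hpyAt i hi', hpyAt k hk]; exact hk2.symm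
        · rw [beq_iff_eq, hpyCh k hk]; exact hk1
    · rw [if_neg h0]

-- ---- the option-minimum combining skip/take results, as in B's match

def omin : Option Int → Option Int → Option Int
  | none, t => t
  | some s, none => some s
  | some s, some t => some (min s t)

lemma omin_none_right : ∀ a, omin a none = a := by
  intro a; cases a <;> rfl

lemma omin_assoc : ∀ a b c, omin (omin a b) c = omin a (omin b c) := by
  intro a b c
  cases a <;> cases b <;> cases c <;> simp [omin, min_assoc]

lemma foldr_omin_shift (l : List (Option Int)) : ∀ m, l.foldr omin m = omin (l.foldr omin none) m := by
  induction l with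
  | nil => intro m; rfl
  | cons x xs ih =>
    intro m
    rw [List.foldr_cons, List.foldr_cons, ih m, omin_assoc]

lemma map_omin (a b : Option Int) :
    Option.map (· + 1) (omin a b) = omin (a.map (· + 1)) (b.map (· + 1)) := by
  cases a <;> cases b <;> simp [omin]

lemma foldr_omin_map_succ {α : Type} (l : List α) (h : α → Option Int) :
    (l.map (fun a => (h a).map (· + 1))).foldr omin none
      = ((l.map h).foldr omin none).map (· + 1) := by
  induction l with
  | nil => rfl
  | cons x xs ih => simp only [List.map_cons, List.foldr_cons, ih, map_omin]

lemma bestB_char (rows cols : PySem.Set String) : ∀ (items : List (String × String))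
    (kr kc : PySem.Set String),
    bestB rows cols items kr kc
      = ((decs items.length).map (fun cs =>
          if PySem.Set.issubset rows (addKept items cs (kr, kc)).1 &&
             PySem.Set.issubset cols (addKept items cs (kr, kc)).2
          then some ((cs.count '1' : Nat) : Int) else none)).foldr omin none := by
  intro items
  induction items with
  | nil =>
    intro kr kc
    simp only [List.length_nil, decs, List.map_cons, List.map_nil, List.foldr_cons,
      List.foldr_nil, omin_none_right]
    rfl
  | cons rc rest ih =>
    intro kr kc
    rw [show bestB rows cols (rc :: rest) kr kc
          = omin (bestB rows cols rest kr kc)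
              ((bestB rows cols rest (PySem.Set.add kr rc.1) (PySem.Set.add kc rc.2)).map
                (· + 1)) from rfl]
    rw [show (rc :: rest).length = rest.length + 1 from rfl,
        show decs (rest.length + 1)
          = (decs rest.length).map ('0' :: ·) ++ (decs rest.length).map ('1' :: ·) from rfl,
        List.map_append, List.map_map, List.map_map, List.foldr_append, foldr_omin_shift]
    have h0 : (decs rest.length).map ((fun cs =>
          if PySem.Set.issubset rows (addKept (rc :: rest) cs (kr, kc)).1 &&
             PySem.Set.issubset cols (addKept (rc :: rest) cs (kr, kc)).2
          then some ((cs.count '1' : Nat) : Int) else none) ∘ ('0' :: ·))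
        = (decs rest.length).map (fun cs =>
          if PySem.Set.issubset rows (addKept rest cs (kr, kc)).1 &&
             PySem.Set.issubset cols (addKept rest cs (kr, kc)).2
          then some ((cs.count '1' : Nat) : Int) else none) := by
      apply List.map_congr_left
      intro cs _
      simp only [Function.comp]
      rw [show addKept (rc :: rest) ('0' :: cs) (kr, kc)
            = addKept rest cs (kr, kc) from rfl,
          show ('0' :: cs).count '1' = cs.count '1' by simp]
    have h1 : (decs rest.length).map ((fun cs =>
          if PySem.Set.issubset rows (addKept (rc :: rest) cs (kr, kc)).1 &&
             PySem.Set.issubset cols (addKept (rc :: rest) cs (kr, kc)).2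
          then some ((cs.count '1' : Nat) : Int) else none) ∘ ('1' :: ·))
        = (decs rest.length).map (fun cs =>
          ((fun cs => if PySem.Set.issubset rows
                (addKept rest cs (PySem.Set.add kr rc.1, PySem.Set.add kc rc.2)).1 &&
              PySem.Set.issubset cols
                (addKept rest cs (PySem.Set.add kr rc.1, PySem.Set.add kc rc.2)).2
            then some ((cs.count '1' : Nat) : Int) else none) cs).map (· + 1)) := by
      apply List.map_congr_left
      intro cs _
      simp only [Function.comp]
      rw [show addKept (rc :: rest) ('1' :: cs) (kr, kc)
            = addKept rest cs (PySem.Set.add kr rc.1, PySem.Set.add kc rc.2) from rfl,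
          show ('1' :: cs).count '1' = cs.count '1' + 1 by simp]
      by_cases hc : (PySem.Set.issubset rows
            (addKept rest cs (PySem.Set.add kr rc.1, PySem.Set.add kc rc.2)).1 &&
          PySem.Set.issubset cols
            (addKept rest cs (PySem.Set.add kr rc.1, PySem.Set.add kc rc.2)).2) = true
      · rw [if_pos hc, if_pos hc]
        simp
      · rw [if_neg hc, if_neg hc]
        rfl
    rw [h0, h1, ← ih kr kc, foldr_omin_map_succ, ← ih (PySem.Set.add kr rc.1) (PySem.Set.add kc rc.2)]

lemma foldr_omin_bound (n : Int) : ∀ (L : List (Option Int)),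
    (∀ o ∈ L, ∀ m : Int, o = some m → 0 ≤ m ∧ m ≤ n) →
    ∀ m : Int, L.foldr omin none = some m → 0 ≤ m ∧ m ≤ n := by
  intro L
  induction L with
  | nil => intro _ m h; simp at h
  | cons o t ih =>
    intro hb m h
    have ht := ih (fun o ho => hb o (List.mem_cons_of_mem _ ho))
    have ho := hb o (List.mem_cons_self)
    simp only [List.foldr_cons] at h
    cases o with
    | none => exact ht m h
    | some k =>
      have h1 := ho k rfl
      cases hres : t.foldr omin none with
      | none =>
        rw [hres] at h
        simp only [omin, Option.some.injEq] at h
        omega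
      | some m' =>
        rw [hres] at h
        simp only [omin, Option.some.injEq] at h
        have h2 := ht m' hres
        omega

lemma foldr_omin_isSome : ∀ (L : List (Option Int)) (o : Option Int), o ∈ L → o.isSome →
    (L.foldr omin none).isSome := by
  intro L
  induction L with
  | nil => intro o h; simp at h
  | cons x t ih =>
    intro o ho hs
    simp only [List.foldr_cons]
    rcases List.mem_cons.mp ho with rfl | ho2
    · cases o with
      | none => simp at hs
      | some k => cases t.foldr omin none <;> simp [omin]
    · have hrest := ih o ho2 hs
      cases x with
      | none => simpa [omin] using hrest
      | some k =>
        cases hres : t.foldr omin none with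
        | none => rw [hres] at hrest; simp at hrest
        | some m => simp [omin]

lemma foldl_max_eq (l : List Int) : ∀ (b : Int), 0 ≤ b → l.foldl max b = max b (l.foldr max 0) := by
  induction l with
  | nil => intro b hb; simp; omega
  | cons x t ih =>
    intro b hb
    simp only [List.foldl_cons, List.foldr_cons]
    rw [ih (max b x) (by omega)]
    omega

lemma foldA_max (d : List (String × String)) : ∀ (l : List Nat) (b : Int), 0 ≤ b →
    l.foldl (fun (big : Int) (i : Nat) =>
      if (((bits d.length i).reverse.count '0' : Nat) : Int) ≤ big then big
      else if testA d ((bits d.length i).reverse) then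
        (if (((bits d.length i).reverse.count '0' : Nat) : Int) > big
          then (((bits d.length i).reverse.count '0' : Nat) : Int) else big)
      else big) b
    = l.foldl (fun (big : Int) (i : Nat) =>
        max big (if testA d ((bits d.length i).reverse)
          then (((bits d.length i).reverse.count '0' : Nat) : Int) else 0)) b := by
  intro l
  induction l with
  | nil => intro b _; rfl
  | cons x t ih =>
    intro b hb
    simp only [List.foldl_cons]
    have hstep : (if (((bits d.length x).reverse.count '0' : Nat) : Int) ≤ b then b
        else if testA d ((bits d.length x).reverse) then
          (if (((bits d.length x).reverse.count '0' : Nat) : Int) > b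
            then (((bits d.length x).reverse.count '0' : Nat) : Int) else b)
        else b)
        = max b (if testA d ((bits d.length x).reverse)
            then (((bits d.length x).reverse.count '0' : Nat) : Int) else 0) := by
      cases htest : testA d ((bits d.length x).reverse) <;> split_ifs <;> omega
    rw [hstep, ih _ (by omega)]

lemma maxmin (n : Int) : ∀ (L : List (Option Int)),
    (∀ o ∈ L, ∀ m : Int, o = some m → 0 ≤ m ∧ m ≤ n) →
    (L.map (fun o => match o with | some m => n - m | none => 0)).foldr max 0
      = match L.foldr omin none with | some m => n - m | none => 0 := by
  intro L
  induction L with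
  | nil => intro _; rfl
  | cons o t ih =>
    intro hb
    have ht := ih (fun o ho => hb o (List.mem_cons_of_mem _ ho))
    have hbt := foldr_omin_bound n t (fun o ho => hb o (List.mem_cons_of_mem _ ho))
    have hbo := hb o (List.mem_cons_self)
    simp only [List.map_cons, List.foldr_cons, ht]
    cases o with
    | none =>
      cases hres : t.foldr omin none with
      | none => show max 0 0 = (0 : Int); omega
      | some m =>
        have := hbt m hres
        show max 0 (n - m) = n - m
        omega
    | some k =>
      have hk := hbo k rfl
      cases hres : t.foldr omin none with
      | none =>
        show max (n - k) 0 = n - k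
        omega
      | some m =>
        have hm := hbt m hres
        show max (n - k) (n - m) = (match omin (some k) (some m) with | some m => n - m | none => 0)
        simp only [omin]
        show max (n - k) (n - m) = n - min k m
        omega

-- ===== VERDICT (by name: the statement is the Claim_ definition above) =====
theorem solve_spec : Claim_unchanged_solve := by
  intro d _ hPre hnD
  have hne : d ≠ [] := hnD
  have hn1 : 1 ≤ d.length := by
    have := List.length_pos_iff.mpr hne
    omega
  have hn17 : d.length ≤ 17 := hPre
  -- the list of per-decision results on B's side
  have hA : solve d = max 0 (((decs d.length).map (fun cs =>
      if testA d cs then ((cs.count '0' : Nat) : Int) else 0)).foldr max 0) := by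
    unfold solve
    have h1 : (List.range (2 ^ d.length)).foldl (fun (big : Int) (i : Nat) =>
        let f := PySem.List.slice (List.replicate 16 '0' ++ PySem.Int.toBinChars (i : Int))
          (some (-(d.length : Int))) none
        if (f.count '0' : Int) ≤ big then big
        else if testA d f then (if (f.count '0' : Int) > big then (f.count '0' : Int) else big)
        else big) 0
      = (List.range (2 ^ d.length)).foldl (fun (big : Int) (i : Nat) =>
          if (((bits d.length i).reverse.count '0' : Nat) : Int) ≤ big then big
          else if testA d ((bits d.length i).reverse) then
            (if (((bits d.length i).reverse.count '0' : Nat) : Int) > big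
              then (((bits d.length i).reverse.count '0' : Nat) : Int) else big)
          else big) 0 := by
      apply PySem.List.foldl_congr_mem
      intro big i hi
      simp only
      rw [f_eq i d.length hn1 hn17]
    rw [h1, foldA_max d _ 0 le_rfl]
    have h2 : (List.range (2 ^ d.length)).foldl (fun (big : Int) (i : Nat) =>
        max big (if testA d ((bits d.length i).reverse)
          then (((bits d.length i).reverse.count '0' : Nat) : Int) else 0)) 0
      = ((((List.range (2 ^ d.length)).map (fun i => (bits d.length i).reverse)).map
          (fun cs => if testA d cs then ((cs.count '0' : Nat) : Int) else 0)).foldl max 0) := by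
      rw [List.map_map, List.foldl_map]
      rfl
    rw [h2, map_wbits_range d.length, foldl_max_eq _ 0 le_rfl]
  -- B's side as the option-minimum over the same decision list
  have hB : bestB (PySem.Set.ofList (d.map Prod.fst)) (PySem.Set.ofList (d.map Prod.snd)) d
      PySem.Set.empty PySem.Set.empty
      = ((decs d.length).map (fun cs =>
          if PySem.Set.issubset (PySem.Set.ofList (d.map Prod.fst))
              (addKept d cs (PySem.Set.empty, PySem.Set.empty)).1 &&
            PySem.Set.issubset (PySem.Set.ofList (d.map Prod.snd))
              (addKept d cs (PySem.Set.empty, PySem.Set.empty)).2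
          then some ((cs.count '1' : Nat) : Int) else none)).foldr omin none :=
    bestB_char _ _ d _ _
  -- the two per-decision values correspond
  have hcong : (decs d.length).map (fun cs =>
        if testA d cs then ((cs.count '0' : Nat) : Int) else 0)
      = ((decs d.length).map (fun cs =>
          if PySem.Set.issubset (PySem.Set.ofList (d.map Prod.fst))
              (addKept d cs (PySem.Set.empty, PySem.Set.empty)).1 &&
            PySem.Set.issubset (PySem.Set.ofList (d.map Prod.snd))
              (addKept d cs (PySem.Set.empty, PySem.Set.empty)).2
          then some ((cs.count '1' : Nat) : Int) else none)).map
        (fun o => match o with | some m => (d.length : Int) - m | none => 0) := by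
    rw [List.map_map]
    apply List.map_congr_left
    intro cs hcs
    have hlen : cs.length = d.length := mem_decs_length hcs
    have hch := mem_decs_chars hcs
    have hcount := count_decs hcs
    simp only [Function.comp]
    rw [testA_eq_cov d cs hlen hch]
    by_cases hc : (PySem.Set.issubset (PySem.Set.ofList (d.map Prod.fst))
        (addKept d cs (PySem.Set.empty, PySem.Set.empty)).1 &&
      PySem.Set.issubset (PySem.Set.ofList (d.map Prod.snd))
        (addKept d cs (PySem.Set.empty, PySem.Set.empty)).2) = true
    · rw [if_pos hc, if_pos hc]
      push_cast
      omega
    · rw [if_neg hc, if_neg hc]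
  -- each produced minimum candidate lies between 0 and n
  have hbound : ∀ o ∈ (decs d.length).map (fun cs =>
        if PySem.Set.issubset (PySem.Set.ofList (d.map Prod.fst))
            (addKept d cs (PySem.Set.empty, PySem.Set.empty)).1 &&
          PySem.Set.issubset (PySem.Set.ofList (d.map Prod.snd))
            (addKept d cs (PySem.Set.empty, PySem.Set.empty)).2
        then some ((cs.count '1' : Nat) : Int) else none),
      ∀ m : Int, o = some m → 0 ≤ m ∧ m ≤ (d.length : Int) := by
    intro o ho m hom
    obtain ⟨cs, hcs, rfl⟩ := List.mem_map.mp ho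
    have hlen : cs.length = d.length := mem_decs_length hcs
    split_ifs at hom with hc
    obtain rfl : ((cs.count '1' : Nat) : Int) = m := Option.some.inj hom
    have hle : cs.count '1' ≤ cs.length := List.count_le_length
    omega
  -- keeping everything is always a cover, so the minimum exists
  have hrep : testA d (List.replicate d.length '1') = true := by
    unfold testA
    rw [List.all_eq_true]
    intro i hi
    have hi' : i < d.length := List.mem_range.mp hi
    rw [if_neg]
    unfold pyCh
    rw [PySem.List.pyGet?_natCast, List.getElem?_eq_getElem (by simp; omega),
      Option.getD_some, List.getElem_replicate]
    decide
  have hsome : (((decs d.length).map (fun cs =>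
      if PySem.Set.issubset (PySem.Set.ofList (d.map Prod.fst))
          (addKept d cs (PySem.Set.empty, PySem.Set.empty)).1 &&
        PySem.Set.issubset (PySem.Set.ofList (d.map Prod.snd))
          (addKept d cs (PySem.Set.empty, PySem.Set.empty)).2
      then some ((cs.count '1' : Nat) : Int) else none)).foldr omin none).isSome := by
    apply foldr_omin_isSome _ (some (((List.replicate d.length '1').count '1' : Nat) : Int))
    · apply List.mem_map.mpr
      refine ⟨List.replicate d.length '1', replicate_mem_decs d.length, ?_⟩
      rw [if_pos]
      rw [← testA_eq_cov d _ (by simp) (by intro c hc; right; exact List.eq_of_mem_replicate hc)]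
      exact hrep
    · rfl
  obtain ⟨m, hm⟩ := Option.isSome_iff_exists.mp hsome
  have hmb := foldr_omin_bound (d.length : Int) _ hbound m hm
  -- put the two sides together
  rw [hA, hcong, maxmin (d.length : Int) _ hbound, hm]
  show max 0 ((d.length : Int) - m) = solve_alt d
  unfold solve_alt
  simp only
  rw [hB, hm]
  show max 0 ((d.length : Int) - m) = (d.length : Int) - m
  omega

theorem solve_changed : Claim_changed_solve := by unfold Claim_changed_solve; decide

theorem solve_tight : Claim_exact_solve := by
  intro d _ _ hD
  unfold D_solve at hD
  subst hD
  decide
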